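-- pv_equiv track=rewrite | github.com/ahuber950/Euler | pe016/pe016.py | mod16
-- ===== SOURCE A (Python) =====
-- def mod16(power):
--
-- 	if type(power) != int or power < 0:
-- 		raise ValueError("The dimensions must be integers greater than or equal to zero")
--
-- 	product = 2 ** power
-- 	sum = 0
-- 	for i in str(product):
-- 		sum += int(i)
-- 	return sum
-- ===== SOURCE B (Python) =====
-- def mod16(power):
--     if type(power) != int or power < 0:
--         raise ValueError("The dimensions must be integers greater than or equal to zero")
--     product = 2 ** power
--     # digit sum by divide and conquer: split on powers 10^(18*2^i), divmod loop at the base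
--     pws = [10 ** 18]
--     while pws[-1] ** 2 <= product:
--         pws.append(pws[-1] ** 2)
--     def rec(n, i):
--         if i == 0:
--             total = 0
--             while n:
--                 n, d = divmod(n, 10)
--                 total += d
--             return total
--         q, r = divmod(n, pws[i - 1])
--         return rec(q, i - 1) + rec(r, i - 1)
--     return rec(product, len(pws) - 1)
-- ===== Notes on version B (the rewrite author's own statement) =====
-- stated objective: alternative
-- what changed: B extracts and sums the decimal digits arithmetically by divide-and-conquer divmod on precomputed powers 10^(18*2^i) (with a small divmod-by-10 loop at the base) instead of converting 2**power to a decimal string and summing int(ch) over its characters.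
import Mathlib
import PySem

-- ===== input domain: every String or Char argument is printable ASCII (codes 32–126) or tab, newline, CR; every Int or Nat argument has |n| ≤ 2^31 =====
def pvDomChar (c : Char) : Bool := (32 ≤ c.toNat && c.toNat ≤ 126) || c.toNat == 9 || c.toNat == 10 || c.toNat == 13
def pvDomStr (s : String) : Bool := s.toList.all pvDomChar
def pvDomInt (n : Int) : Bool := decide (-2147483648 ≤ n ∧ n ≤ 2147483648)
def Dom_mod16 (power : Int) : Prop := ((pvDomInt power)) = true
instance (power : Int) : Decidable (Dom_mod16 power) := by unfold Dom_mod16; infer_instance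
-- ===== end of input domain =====

-- B sums the decimal digits of 2**power by divide-and-conquer divmod on powers 10^(18*2^i)
-- instead of iterating over str(2**power); an alternative of similar cost (equivalence on power ≥ 0).

-- ===== PORT A =====
-- A: product = 2 ** power; sum int(ch) over str(product).
-- int(ch) on a single char of str(product) is exact as (ch.toNat - 48): every such char is a decimal digit.
def mod16 (power : Int) : Int :=
  if power < 0 then 0  -- Python raises ValueError here; excluded by Pre_mod16
  else
    let product : Int := 2 ^ power.toNat
    (PySem.Int.toStr product).toList.foldl (fun s c => s + ((c.toNat : Int) - 48)) 0

-- ===== PORT B =====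
-- all quantities are nonnegative integers, so Python's divmod is exactly Nat division/remainder here
-- B's base-case while loop: while n: n, d = divmod(n, 10); total += d
def mod16AltLoop (n : Nat) (total : Int) : Int :=
  if n = 0 then total
  else mod16AltLoop (n / 10) (total + ((n % 10 : Nat) : Int))
decreasing_by exact Nat.div_lt_self (Nat.pos_of_ne_zero (by assumption)) (by norm_num)

-- B's `while pws[-1] ** 2 <= product: pws.append(pws[-1] ** 2)`; `last` is pws[-1].
-- The conjunct `2 ≤ last` only makes the loop terminating (it always holds: last starts at 10^18).
def pwsLoop (product : Nat) (pws : List Nat) (last : Nat) : List Nat :=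
  if h : 2 ≤ last ∧ last * last ≤ product then
    pwsLoop product (pws ++ [last * last]) (last * last)
  else pws
termination_by product + 1 - last
decreasing_by
  have h1 : last < last * last := by nlinarith [h.1, h.2]
  omega

-- B's inner `rec(n, i)`
def recDS (pws : List Nat) (n : Nat) (i : Nat) : Int :=
  match i with
  | 0 => mod16AltLoop n 0
  | Nat.succ j =>
    let p := pws.getD j 1
    recDS pws (n / p) j + recDS pws (n % p) j

def mod16_alt (power : Int) : Int :=
  if power < 0 then 0  -- Python raises ValueError here; excluded by Pre_mod16
  else
    let product : Nat := 2 ^ power.toNat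
    let pws : List Nat := pwsLoop product [10 ^ 18] (10 ^ 18)
    recDS pws product (pws.length - 1)

-- ===== PRECONDITION & SPEC =====
-- A raises ValueError exactly when power < 0 (we only consider int arguments).
def Pre_mod16 (power : Int) : Prop := 0 ≤ power
instance (power : Int) : Decidable (Pre_mod16 power) := by unfold Pre_mod16; infer_instance

def pvWitness_mod16 : Int := (10)

def Spec_mod16 (power : Int) (out : Int) : Prop := out = mod16_alt power
instance (power : Int) (out : Int) : Decidable (Spec_mod16 power out) := by unfold Spec_mod16; infer_instance

-- ===== CLAIM (what is proved, stated in full; the proofs are below) =====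
def Claim_equal_mod16 : Prop := ∀ (power : Int), Dom_mod16 power → Pre_mod16 power → Spec_mod16 power (mod16 power)

-- ===== LEMMAS AND PROOFS =====

-- digit chars: the per-character value A extracts
lemma g_digitChar (d : Nat) (h : d < 10) :
    ((Nat.digitChar d).toNat : Int) - 48 = (d : Int) := by
  interval_cases d <;> rfl

-- the characters Nat.toDigits produces, in terms of Nat.digits (for positive n)
lemma toDigitsCore_eq (fuel n : Nat) (ds : List Char) (hfuel : n < fuel) (hn : 0 < n) :
    Nat.toDigitsCore 10 fuel n ds =
      ((Nat.digits 10 n).map Nat.digitChar).reverse ++ ds := by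
  induction fuel generalizing n ds with
  | zero => omega
  | succ f ih =>
    rw [Nat.toDigitsCore]
    by_cases h : n / 10 = 0
    · have hlt : n < 10 := by omega
      rw [if_pos h, Nat.digits_def' (by norm_num : 1 < 10) hn, h, Nat.digits_zero]
      have : n % 10 = n := Nat.mod_eq_of_lt hlt
      simp [this]
    · rw [if_neg h]
      have h10 : 10 ≤ n := by
        by_contra hc
        exact h (Nat.div_eq_of_lt (by omega))
      have hrec : n / 10 < f := by
        have := Nat.div_lt_self hn (by norm_num : 1 < 10)
        omega
      rw [ih (n / 10) _ hrec (Nat.pos_of_ne_zero h)]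
      rw [Nat.digits_def' (by norm_num : 1 < 10) hn]
      simp

lemma toDigits_eq (n : Nat) (hn : 0 < n) :
    Nat.toDigits 10 n = ((Nat.digits 10 n).map Nat.digitChar).reverse := by
  have := toDigitsCore_eq (n + 1) n [] (Nat.lt_succ_self n) hn
  simpa [Nat.toDigits] using this

-- A's fold accumulates the per-character values additively
lemma foldl_g (L : List Char) (acc : Int) :
    L.foldl (fun s c => s + ((c.toNat : Int) - 48)) acc
      = acc + (L.map (fun c => ((c.toNat : Int) - 48))).sum := by
  induction L generalizing acc with
  | nil => simp
  | cons c L ih => simp [List.foldl_cons, ih]; ring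

-- A's side equals the digit sum of n
lemma mod16_fold_eq (n : Nat) :
    (Nat.toDigits 10 n).foldl (fun s c => s + ((c.toNat : Int) - 48)) 0
      = ((Nat.digits 10 n).sum : Int) := by
  rcases Nat.eq_zero_or_pos n with rfl | hn
  · decide
  · rw [toDigits_eq n hn, foldl_g]
    rw [List.map_reverse, List.sum_reverse, List.map_map]
    have hmap : (Nat.digits 10 n).map ((fun c => ((c.toNat : Int) - 48)) ∘ Nat.digitChar)
        = (Nat.digits 10 n).map (Nat.cast : Nat → Int) := by
      apply List.map_congr_left
      intro d hd
      exact g_digitChar d (Nat.digits_lt_base (by norm_num) hd)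
    rw [hmap]
    rw [zero_add]; exact (Nat.cast_list_sum (R := Int) (Nat.digits 10 n)).symm

-- B's base loop computes the digit sum of n
lemma mod16AltLoop_eq (n : Nat) (acc : Int) :
    mod16AltLoop n acc = acc + ((Nat.digits 10 n).sum : Int) := by
  induction n using Nat.strong_induction_on generalizing acc with
  | _ n ih =>
    rw [mod16AltLoop]
    by_cases h : n = 0
    · simp [h]
    · rw [if_neg h]
      rw [ih (n / 10) (Nat.div_lt_self (Nat.pos_of_ne_zero h) (by norm_num)) _]
      rw [Nat.digits_def' (by norm_num : 1 < 10) (Nat.pos_of_ne_zero h)]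
      rw [Nat.cast_list_sum, Nat.cast_list_sum, List.map_cons, List.sum_cons]
      ring

-- a number below 10^e has at most e decimal digits
lemma digits_length_le_of_lt (r e : Nat) (hr : r < 10 ^ e) : (Nat.digits 10 r).length ≤ e := by
  rcases Nat.eq_zero_or_pos r with rfl | hp
  · simp
  by_contra hl
  have hl' : e + 1 ≤ (Nat.digits 10 r).length := by omega
  have h1 := Nat.base_pow_length_digits_le 10 r (by norm_num) (Nat.pos_iff_ne_zero.mp hp)
  have h2 : (10 : Nat) ^ (e + 1) ≤ 10 ^ (Nat.digits 10 r).length :=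
    Nat.pow_le_pow_right (by norm_num) hl'
  have h3 : (10 : Nat) ^ (e + 1) = 10 * 10 ^ e := by ring
  omega

-- splitting at a power of ten splits the digit sum
lemma sum_digits_split (e q r : Nat) (hr : r < 10 ^ e) :
    (Nat.digits 10 (r + 10 ^ e * q)).sum = (Nat.digits 10 r).sum + (Nat.digits 10 q).sum := by
  rcases Nat.eq_zero_or_pos q with rfl | hq
  · simp
  · have hlen : (Nat.digits 10 r).length ≤ e := digits_length_le_of_lt r e hr
    obtain ⟨k, hk⟩ : ∃ k, e = (Nat.digits 10 r).length + k := ⟨e - (Nat.digits 10 r).length, by omega⟩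
    have h := Nat.digits_append_zeroes_append_digits (b := 10) (k := k) (m := q) (n := r)
      (by norm_num) hq
    rw [hk, ← h]
    simp [List.sum_append, List.sum_replicate]

-- every element pwsLoop produces is a power of ten
lemma pwsLoop_pows (product : Nat) (pws : List Nat) (last : Nat) :
    (∀ x ∈ pws, ∃ e, x = 10 ^ e) → (∃ e, last = 10 ^ e) →
    ∀ x ∈ pwsLoop product pws last, ∃ e, x = 10 ^ e := by
  refine pwsLoop.induct product
    (fun pws last => (∀ x ∈ pws, ∃ e, x = 10 ^ e) → (∃ e, last = 10 ^ e) →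
      ∀ x ∈ pwsLoop product pws last, ∃ e, x = 10 ^ e) ?_ ?_ pws last
  · intro pws last h ih hp hl
    rw [pwsLoop, dif_pos h]
    refine ih ?_ ?_
    · intro x hx
      rcases List.mem_append.mp hx with hx | hx
      · exact hp x hx
      · obtain ⟨e, rfl⟩ := hl
        simp only [List.mem_singleton] at hx
        exact ⟨e + e, by rw [hx]; ring⟩
    · obtain ⟨e, rfl⟩ := hl
      exact ⟨e + e, by ring⟩
  · intro pws last h hp _
    rw [pwsLoop, dif_neg h]
    exact hp

-- B's divide-and-conquer recursion computes the digit sum of n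
lemma recDS_eq (pws : List Nat) (hp : ∀ x ∈ pws, ∃ e, x = 10 ^ e) (n i : Nat) :
    recDS pws n i = ((Nat.digits 10 n).sum : Int) := by
  induction i generalizing n with
  | zero => simpa using mod16AltLoop_eq n 0
  | succ j ih =>
    have hpow : ∃ e, pws.getD j 1 = 10 ^ e := by
      by_cases hj : j < pws.length
      · rw [List.getD_eq_getElem _ _ hj]
        exact hp _ (List.getElem_mem hj)
      · rw [List.getD_eq_default _ _ (by omega)]
        exact ⟨0, by norm_num⟩
    obtain ⟨e, he⟩ := hpow
    rw [recDS]
    simp only [he]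
    rw [ih, ih]
    have hs := sum_digits_split e (n / 10 ^ e) (n % 10 ^ e)
      (Nat.mod_lt _ (by positivity))
    rw [Nat.mod_add_div] at hs
    rw [hs]
    push_cast
    ring

-- ===== VERDICT (by name: the statement is the Claim_ definition above) =====
theorem mod16_spec : Claim_equal_mod16 := by
  intro power _ hpre
  unfold Spec_mod16 mod16 mod16_alt
  have hneg : ¬ power < 0 := by exact not_lt.mpr hpre
  rw [if_neg hneg, if_neg hneg]
  show ((PySem.Int.toStr ((2 : Int) ^ power.toNat)).toList.foldl
      (fun s c => s + ((c.toNat : Int) - 48)) 0)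
    = recDS (pwsLoop (2 ^ power.toNat) [10 ^ 18] (10 ^ 18)) (2 ^ power.toNat)
        ((pwsLoop (2 ^ power.toNat) [10 ^ 18] (10 ^ 18)).length - 1)
  rw [PySem.Int.toList_toStr]
  have hchars : PySem.Int.toChars ((2 : Int) ^ power.toNat)
      = Nat.toDigits 10 (2 ^ power.toNat) := by
    unfold PySem.Int.toChars
    have h2 : ((2 : Int) ^ power.toNat) = ((2 ^ power.toNat : Nat) : Int) := by push_cast; ring
    rw [if_neg (not_lt.mpr (by positivity : (0:Int) ≤ 2 ^ power.toNat)), h2, Int.toNat_natCast]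
  rw [hchars, mod16_fold_eq,
    recDS_eq _ (pwsLoop_pows _ _ _ (by rintro x hx; simp at hx; exact ⟨18, hx⟩) ⟨18, rfl⟩)]
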